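-- pv_equiv track=rewrite | github.com/baihaqi2193/daspro | compsci.py | KaliList
-- ===== SOURCE A (Python) =====
-- def IsEmpty(L):
--     if L == []:
--         return True
--     else:
--         return False
--
-- def Tail(L):
--     if not(IsEmpty(L)):
--         return L[1:]
--
-- def FirstElmt(L):
--     return L[0]
--
-- def Konso(e, L):
--     Ls = list(L)
--     Ls.insert(0,e)
--     return Ls
--
-- def KaliList(k,L):
--     if L == []:
--         return []
--     else:
--         if k == 0 :
--             return SetAllZero(L)
--         elif k == 1:
--             return L
--         else:
--             return Konso(k*FirstElmt(L),KaliList(k,Tail(L)))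
--
-- def SetAllZero(L):
--     if L == []:
--         return []
--     else:
--         return Konso(0,SetAllZero(Tail(L)))
-- ===== SOURCE B (Python) =====
-- def KaliList(k, L):
--     out = []
--     for x in L:
--         out.append(k * x)
--     return out
-- ===== Notes on version B (the rewrite author's own statement) =====
-- stated objective: simpler
-- what changed: Replaced the three-branch recursion (empty / k==0 SetAllZero recursion / k==1 identity / Konso-FirstElmt-Tail recursion) by one iterative forward pass appending k*x per element, identical in value since 0*x==0 and 1*x==x.
import Mathlib
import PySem

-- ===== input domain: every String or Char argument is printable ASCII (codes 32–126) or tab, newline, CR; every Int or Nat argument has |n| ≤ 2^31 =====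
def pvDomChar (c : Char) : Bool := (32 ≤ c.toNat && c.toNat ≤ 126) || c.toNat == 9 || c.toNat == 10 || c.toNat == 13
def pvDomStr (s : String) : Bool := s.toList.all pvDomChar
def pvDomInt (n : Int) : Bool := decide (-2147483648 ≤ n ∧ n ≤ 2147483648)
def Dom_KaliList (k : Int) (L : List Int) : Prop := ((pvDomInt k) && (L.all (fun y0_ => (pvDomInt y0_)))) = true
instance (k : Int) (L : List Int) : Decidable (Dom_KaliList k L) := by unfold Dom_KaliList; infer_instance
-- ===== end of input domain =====

-- B replaces A's branch-and-recurse (Konso/FirstElmt/Tail, SetAllZero) structure by a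
-- single iterative accumulator pass; return values are identical (0*x = 0, 1*x = x).

-- ===== PORT A =====
-- helpers transliterated from compsci.py
def IsEmptyA (L : List Int) : Bool := if L = [] then true else false

-- Python's Tail returns None on []; KaliList/SetAllZero only call it on non-empty lists,
-- where it is exactly L[1:]; modelled as Option, none = Python's None.
def TailA (L : List Int) : Option (List Int) :=
  if ¬ (IsEmptyA L = true) then some (PySem.List.slice L (some 1) none) else none

-- L[0]; none = IndexError (never reached: only called on non-empty L)
def FirstElmtA (L : List Int) : Option Int := PySem.List.pyGet? L 0

-- Ls = list(L); Ls.insert(0, e)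
def KonsoA (e : Int) (L : List Int) : List Int := PySem.List.insert L 0 e

def SetAllZeroA (L : List Int) : List Int :=
  if L = [] then []
  else KonsoA 0 (SetAllZeroA ((TailA L).getD []))
termination_by L.length
decreasing_by
  cases L with
  | nil => simp_all
  | cons x xs => simp [TailA, IsEmptyA, PySem.List.slice_from_one]

def KaliList (k : Int) (L : List Int) : List Int :=
  if L = [] then []
  else if k = 0 then SetAllZeroA L
  else if k = 1 then L
  else KonsoA (k * (FirstElmtA L).getD 0) (KaliList k ((TailA L).getD []))
termination_by L.length
decreasing_by
  cases L with
  | nil => simp_all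
  | cons x xs => simp [TailA, IsEmptyA, PySem.List.slice_from_one]

-- ===== PORT B =====
def KaliList_alt (k : Int) (L : List Int) : List Int :=
  L.foldl (fun out x => out ++ [k * x]) []

-- ===== PRECONDITION & SPEC =====
def Spec_KaliList (k : Int) (L : List Int) (out : List Int) : Prop := out = KaliList_alt k L
instance (k : Int) (L : List Int) (out : List Int) : Decidable (Spec_KaliList k L out) := by unfold Spec_KaliList; infer_instance

-- ===== CLAIM (what is proved, stated in full; the proofs are below) =====
def Claim_equal_KaliList : Prop := ∀ (k : Int) (L : List Int), Dom_KaliList k L → Spec_KaliList k L (KaliList k L)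

-- ===== LEMMAS AND PROOFS =====

theorem KaliList_alt_eq_map (k : Int) (L : List Int) :
    KaliList_alt k L = L.map (fun x => k * x) := by
  rw [KaliList_alt, PySem.List.foldl_append_singleton_eq_map]; simp

theorem SetAllZeroA_eq_map (L : List Int) :
    SetAllZeroA L = L.map (fun _ => (0 : Int)) := by
  induction L with
  | nil => simp [SetAllZeroA]
  | cons x xs ih =>
      rw [SetAllZeroA]
      simp [TailA, IsEmptyA, PySem.List.slice_from_one, KonsoA, PySem.List.insert_zero, ih]

theorem KaliList_eq_map (k : Int) (L : List Int) :
    KaliList k L = L.map (fun x => k * x) := by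
  induction L with
  | nil => simp [KaliList]
  | cons x xs ih =>
      rw [KaliList]
      by_cases h0 : k = 0
      · simp [h0, SetAllZeroA_eq_map]
      · by_cases h1 : k = 1
        · simp [h1]
        · simp [h0, h1, TailA, IsEmptyA, PySem.List.slice_from_one, ih, KonsoA,
            PySem.List.insert_zero, FirstElmtA, PySem.List.pyGet?, PySem.List.pyIdx?]

-- ===== VERDICT (by name: the statement is the Claim_ definition above) =====
theorem KaliList_spec : Claim_equal_KaliList := by
  intro k L _
  unfold Spec_KaliList
  rw [KaliList_eq_map, KaliList_alt_eq_map]
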